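-- pv_equiv track=rewrite | github.com/wjdghksdl26/VisionProject | logicops/countbu.py | count
-- ===== SOURCE A (Python) =====
-- def count(tr, x1, x2, y1, y2, y3, y4, w, h):
--     reg1 = reg2 = reg3 = reg4 = reg5 = reg6 = 0
--     l = len(tr)
--     for i in range(l):
--         (x, y) = tr[i]
--         if 0 < x < x1 and 0 < y < y1:
--             reg1 += 1
--         if x2 < x < w and 0 < y < y1:
--             reg2 += 1
--         if 0 < x < x1 and y4 < y < h:
--             reg3 += 1
--         if x2 < x < w and y4 < y < h:
--             reg4 += 1
--         if 0 < x < x1 and y2 < y < y3: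
--             reg5 += 1
--         if x2 < x < w and y2 < y < y3:
--             reg6 += 1
--
--     return reg1, reg2, reg3, reg4, reg5, reg6
-- ===== SOURCE B (Python) =====
-- def count(tr, x1, x2, y1, y2, y3, y4, w, h):
--     boxes = [(0, x1, 0, y1), (x2, w, 0, y1), (0, x1, y4, h),
--              (x2, w, y4, h), (0, x1, y2, y3), (x2, w, y2, y3)]
--     return tuple(sum(1 for (x, y) in tr if xlo < x < xhi and ylo < y < yhi)
--                  for (xlo, xhi, ylo, yhi) in boxes)
-- ===== Notes on version B (the rewrite author's own statement) =====
-- stated objective: simpler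
-- what changed: B replaces A's index loop with six hand-written region counters by a table of the six region bounding boxes and a per-box count (box-major sum over the points), returned as a tuple.
import Mathlib
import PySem

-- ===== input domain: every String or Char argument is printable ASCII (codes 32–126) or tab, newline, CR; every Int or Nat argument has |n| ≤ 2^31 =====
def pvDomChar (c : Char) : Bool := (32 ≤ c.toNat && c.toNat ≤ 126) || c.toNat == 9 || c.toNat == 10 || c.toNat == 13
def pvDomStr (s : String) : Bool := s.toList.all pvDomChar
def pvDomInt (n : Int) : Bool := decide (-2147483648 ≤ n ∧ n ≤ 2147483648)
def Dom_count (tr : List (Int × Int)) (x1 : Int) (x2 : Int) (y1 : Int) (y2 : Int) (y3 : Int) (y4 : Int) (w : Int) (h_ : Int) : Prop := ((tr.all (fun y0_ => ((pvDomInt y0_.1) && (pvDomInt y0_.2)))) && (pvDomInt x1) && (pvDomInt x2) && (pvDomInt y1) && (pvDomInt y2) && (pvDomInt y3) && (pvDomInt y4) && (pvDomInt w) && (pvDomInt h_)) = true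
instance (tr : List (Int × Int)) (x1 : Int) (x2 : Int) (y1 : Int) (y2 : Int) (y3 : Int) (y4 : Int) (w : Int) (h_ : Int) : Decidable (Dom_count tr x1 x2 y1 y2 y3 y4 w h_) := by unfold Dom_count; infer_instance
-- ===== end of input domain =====

-- B replaces A's index loop with six inline counters by a table of the six boxes and a per-box count; simpler, same cost.

-- ===== PORT A =====
-- literal port of A: for i in range(len(tr)): x,y = tr[i]; six independent if-tests updating six counters
def count (tr : List (Int × Int)) (x1 : Int) (x2 : Int) (y1 : Int) (y2 : Int) (y3 : Int) (y4 : Int) (w : Int) (h_ : Int) : Int × Int × Int × Int × Int × Int :=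
  (PySem.List.pyRange 0 (PySem.List.len tr) 1).foldl
    (fun r i =>
      let p := PySem.List.pyGetD tr i (0, 0)
      let x := p.1
      let y := p.2
      (r.1 + (if 0 < x && x < x1 && 0 < y && y < y1 then 1 else 0),
       r.2.1 + (if x2 < x && x < w && 0 < y && y < y1 then 1 else 0),
       r.2.2.1 + (if 0 < x && x < x1 && y4 < y && y < h_ then 1 else 0),
       r.2.2.2.1 + (if x2 < x && x < w && y4 < y && y < h_ then 1 else 0),
       r.2.2.2.2.1 + (if 0 < x && x < x1 && y2 < y && y < y3 then 1 else 0),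
       r.2.2.2.2.2 + (if x2 < x && x < w && y2 < y && y < y3 then 1 else 0)))
    (0, 0, 0, 0, 0, 0)

-- ===== PORT B =====
-- B-side helper: membership of a point in one bounding box (xlo, xhi, ylo, yhi)
def inBox (b : Int × Int × Int × Int) (p : Int × Int) : Bool :=
  b.1 < p.1 && p.1 < b.2.1 && b.2.2.1 < p.2 && p.2 < b.2.2.2

def count_alt (tr : List (Int × Int)) (x1 : Int) (x2 : Int) (y1 : Int) (y2 : Int) (y3 : Int) (y4 : Int) (w : Int) (h_ : Int) : Int × Int × Int × Int × Int × Int :=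
  let boxes : List (Int × Int × Int × Int) :=
    [(0, x1, 0, y1), (x2, w, 0, y1), (0, x1, y4, h_),
     (x2, w, y4, h_), (0, x1, y2, y3), (x2, w, y2, y3)]
  match boxes.map (fun b => ((tr.countP (inBox b)) : Int)) with
  | [c1, c2, c3, c4, c5, c6] => (c1, c2, c3, c4, c5, c6)
  | _ => (0, 0, 0, 0, 0, 0)

-- ===== PRECONDITION & SPEC =====
def Spec_count (tr : List (Int × Int)) (x1 : Int) (x2 : Int) (y1 : Int) (y2 : Int) (y3 : Int) (y4 : Int) (w : Int) (h_ : Int) (out : Int × Int × Int × Int × Int × Int) : Prop := out = count_alt tr x1 x2 y1 y2 y3 y4 w h_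
instance (tr : List (Int × Int)) (x1 : Int) (x2 : Int) (y1 : Int) (y2 : Int) (y3 : Int) (y4 : Int) (w : Int) (h_ : Int) (out : Int × Int × Int × Int × Int × Int) : Decidable (Spec_count tr x1 x2 y1 y2 y3 y4 w h_ out) := by unfold Spec_count; infer_instance

-- ===== CLAIM (what is proved, stated in full; the proofs are below) =====
def Claim_equal_count : Prop := ∀ (tr : List (Int × Int)) (x1 : Int) (x2 : Int) (y1 : Int) (y2 : Int) (y3 : Int) (y4 : Int) (w : Int) (h_ : Int), Dom_count tr x1 x2 y1 y2 y3 y4 w h_ → Spec_count tr x1 x2 y1 y2 y3 y4 w h_ (count tr x1 x2 y1 y2 y3 y4 w h_)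

-- ===== LEMMAS AND PROOFS =====
-- A's fold with six independent 0/1 increments computes six countP's on top of the accumulator.
theorem foldl_count6 (q1 q2 q3 q4 q5 q6 : Int × Int → Bool) :
    ∀ (tr : List (Int × Int)) (a1 a2 a3 a4 a5 a6 : Int),
      tr.foldl
        (fun (r : Int × Int × Int × Int × Int × Int) p =>
          (r.1 + (if q1 p then 1 else 0),
           r.2.1 + (if q2 p then 1 else 0),
           r.2.2.1 + (if q3 p then 1 else 0),
           r.2.2.2.1 + (if q4 p then 1 else 0),
           r.2.2.2.2.1 + (if q5 p then 1 else 0),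
           r.2.2.2.2.2 + (if q6 p then 1 else 0)))
        (a1, a2, a3, a4, a5, a6)
      = (a1 + tr.countP q1, a2 + tr.countP q2, a3 + tr.countP q3,
         a4 + tr.countP q4, a5 + tr.countP q5, a6 + tr.countP q6) := by
  intro tr
  induction tr with
  | nil => intro a1 a2 a3 a4 a5 a6; simp
  | cons p tl ih =>
      intro a1 a2 a3 a4 a5 a6
      simp only [List.foldl_cons, List.countP_cons, ih]
      simp only [Prod.mk.injEq]
      refine ⟨?_, ?_, ?_, ?_, ?_, ?_⟩ <;> (push_cast; split <;> omega)

theorem count_spec : Claim_equal_count := by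
  intro tr x1 x2 y1 y2 y3 y4 w h_ _
  unfold Spec_count count count_alt
  rw [PySem.List.foldl_pyRange_zero_pyGetD tr (0, 0)
    (fun (r : Int × Int × Int × Int × Int × Int) p =>
      (r.1 + (if 0 < p.1 && p.1 < x1 && 0 < p.2 && p.2 < y1 then 1 else 0),
       r.2.1 + (if x2 < p.1 && p.1 < w && 0 < p.2 && p.2 < y1 then 1 else 0),
       r.2.2.1 + (if 0 < p.1 && p.1 < x1 && y4 < p.2 && p.2 < h_ then 1 else 0),
       r.2.2.2.1 + (if x2 < p.1 && p.1 < w && y4 < p.2 && p.2 < h_ then 1 else 0),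
       r.2.2.2.2.1 + (if 0 < p.1 && p.1 < x1 && y2 < p.2 && p.2 < y3 then 1 else 0),
       r.2.2.2.2.2 + (if x2 < p.1 && p.1 < w && y2 < p.2 && p.2 < y3 then 1 else 0)))
    (0, 0, 0, 0, 0, 0)]
  rw [foldl_count6]
  simp only [List.map, Prod.mk.injEq, zero_add]
  exact ⟨rfl, rfl, rfl, rfl, rfl, rfl⟩
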